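-- pv_equiv track=rewrite | github.com/sanclee09/causalLatentPolytree | learn_with_hidden.py | detect_learnable_nodes
-- ===== SOURCE A (Python) =====
-- from typing import Dict, Tuple, List, Iterable, Optional, Set
--
-- def detect_learnable_nodes(
--     edges: Dict[Tuple[str, str], float], min_outdegree: int = 2
-- ) -> Set[str]:
--     """
--     Return nodes that have out-degree >= min_outdegree.
--     These are treated as "learnable" (to be hidden) when constructing Γ_obs.
--
--     Args:
--         edges: Dictionary mapping (parent, child) to edge weight
--         min_outdegree: Minimum out-degree threshold (default: 2)
--
--     Returns:
--         Set of node names with out-degree >= min_outdegree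
--     """
--     outdeg: Dict[str, int] = {}
--     for u, v in edges.keys():
--         outdeg[u] = outdeg.get(u, 0) + 1
--         outdeg.setdefault(v, outdeg.get(v, 0))
--     return {u for u, d in outdeg.items() if d >= min_outdegree}
-- ===== SOURCE B (Python) =====
-- def detect_learnable_nodes(edges, min_outdegree=2):
--     parents = sorted(u for (u, v) in edges)
--
--     def boundary(n, upper):
--         # binary search: first index whose element is >= n (upper=False)
--         # or > n (upper=True); out-degree of n = boundary(n,True)-boundary(n,False)
--         lo, hi = 0, len(parents)
--         while lo < hi:
--             mid = (lo + hi) // 2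
--             if parents[mid] < n or (upper and parents[mid] == n):
--                 lo = mid + 1
--             else:
--                 hi = mid
--         return lo
--
--     return {n for (u, v) in edges for n in (u, v)
--             if boundary(n, True) - boundary(n, False) >= min_outdegree}
-- ===== Notes on version B (the rewrite author's own statement) =====
-- stated objective: alternative
-- what changed: B builds no out-degree dict at all: it sorts the parent list once and computes each endpoint's out-degree as the width of its run in the sorted list, found by two hand-written binary searches (bisect-left/bisect-right), then filters the endpoints.
import Mathlib
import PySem

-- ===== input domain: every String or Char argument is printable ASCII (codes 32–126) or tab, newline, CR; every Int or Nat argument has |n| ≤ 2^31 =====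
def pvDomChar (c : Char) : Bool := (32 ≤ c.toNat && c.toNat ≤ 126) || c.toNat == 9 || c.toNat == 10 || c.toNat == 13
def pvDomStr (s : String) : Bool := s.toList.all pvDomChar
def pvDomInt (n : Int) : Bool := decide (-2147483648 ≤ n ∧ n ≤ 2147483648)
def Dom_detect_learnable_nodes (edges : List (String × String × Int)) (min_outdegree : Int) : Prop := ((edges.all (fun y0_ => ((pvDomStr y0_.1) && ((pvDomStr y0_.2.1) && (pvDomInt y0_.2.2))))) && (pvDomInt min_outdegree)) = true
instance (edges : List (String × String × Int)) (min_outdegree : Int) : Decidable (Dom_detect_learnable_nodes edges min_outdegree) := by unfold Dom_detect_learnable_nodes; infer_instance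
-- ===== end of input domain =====

-- B builds no out-degree dict: it sorts the parent list once and reads each endpoint's
-- out-degree off the sorted list with two hand-written binary searches (alternative).
-- ===== PORT A =====
def detect_learnable_nodes (edges : List (String × String × Int)) (min_outdegree : Int) : List String :=
  let outdeg : PySem.Dict String Int :=
    edges.foldl (fun d e =>
      let d1 := d.insert e.1 (d.getD e.1 0 + 1)
      d1.setdefault e.2.1 (d1.getD e.2.1 0)) PySem.Dict.empty
  PySem.Set.ofList ((outdeg.items.filter (fun p => decide (min_outdegree ≤ p.2))).map (·.1))

-- ===== PORT B =====
-- the hand-written binary search of Source B (lo/hi loop); mid is in [lo,hi) so getD never defaults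
def pvBoundary (parents : List String) (n : String) (upper : Bool) (lo hi : Nat) : Nat :=
  if h : lo < hi then
    let mid := (lo + hi) / 2
    if parents.getD mid "" < n || (upper && (parents.getD mid "" == n)) then
      pvBoundary parents n upper (mid + 1) hi
    else
      pvBoundary parents n upper lo mid
  else lo
termination_by hi - lo
decreasing_by all_goals omega

def detect_learnable_nodes_alt (edges : List (String × String × Int)) (min_outdegree : Int) : List String :=
  let parents : List String := PySem.List.sorted (edges.map (fun e => e.1)) (fun x => x) false
  PySem.Set.ofList ((edges.flatMap (fun e => [e.1, e.2.1])).filter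
    (fun n => decide (min_outdegree ≤
      ((pvBoundary parents n true 0 parents.length : Int)
        - (pvBoundary parents n false 0 parents.length : Int)))))

-- ===== PRECONDITION & SPEC =====
def Spec_detect_learnable_nodes (edges : List (String × String × Int)) (min_outdegree : Int) (out : List String) : Prop := out = detect_learnable_nodes_alt edges min_outdegree
instance (edges : List (String × String × Int)) (min_outdegree : Int) (out : List String) : Decidable (Spec_detect_learnable_nodes edges min_outdegree out) := by unfold Spec_detect_learnable_nodes; infer_instance

-- ===== CLAIM (what is proved, stated in full; the proofs are below) =====
def Claim_equal_detect_learnable_nodes : Prop := ∀ (edges : List (String × String × Int)) (min_outdegree : Int), Dom_detect_learnable_nodes edges min_outdegree → Spec_detect_learnable_nodes edges min_outdegree (detect_learnable_nodes edges min_outdegree)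

-- ===== LEMMAS AND PROOFS =====

-- proof-only helper: the loop body of port A's fold, named for the lemmas below
def pvStep (d : PySem.Dict String Int) (e : String × String × Int) : PySem.Dict String Int :=
  (d.insert e.1 (d.getD e.1 0 + 1)).setdefault e.2.1
    ((d.insert e.1 (d.getD e.1 0 + 1)).getD e.2.1 0)

theorem pv_getD_self_default (d : PySem.Dict String Int) (k : String) :
    d.getD k (d.getD k 0) = d.getD k 0 := by
  rcases h : d.get? k with _ | v <;> simp [PySem.Dict.getD_eq_get?_getD, h]

theorem pv_getD_step (d : PySem.Dict String Int) (e : String × String × Int) (k : String) :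
    (pvStep d e).getD k 0 = if k = e.1 then d.getD k 0 + 1 else d.getD k 0 := by
  unfold pvStep
  by_cases hv : k = e.2.1
  · subst hv
    rw [PySem.Dict.getD_setdefault_self, pv_getD_self_default, PySem.Dict.getD_insert]
    split_ifs with h <;> simp [h]
  · rw [PySem.Dict.getD_eq_get?_getD, PySem.Dict.get?_setdefault_of_ne _ _ hv,
      ← PySem.Dict.getD_eq_get?_getD, PySem.Dict.getD_insert]
    split_ifs with h <;> simp [h]

theorem pv_keys_insert (d : PySem.Dict String Int) (u : String) (w : Int) :
    (d.insert u w).keys = PySem.Set.add d.keys u := by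
  have h := PySem.Dict.keys_foldl_insert [u] (fun _ _ => w) d
  simpa [PySem.Set.update] using h

theorem pv_keys_step (d : PySem.Dict String Int) (e : String × String × Int) :
    (pvStep d e).keys = PySem.Set.add (PySem.Set.add d.keys e.1) e.2.1 := by
  unfold pvStep
  by_cases hc : (d.insert e.1 (d.getD e.1 0 + 1)).contains e.2.1
  · rw [PySem.Dict.setdefault_of_contains _ _ hc, pv_keys_insert]
    have hm : e.2.1 ∈ (d.insert e.1 (d.getD e.1 0 + 1)).keys :=
      (PySem.Dict.contains_iff_mem_keys _ _).mp hc
    rw [pv_keys_insert] at hm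
    simp [PySem.Set.add]
    simpa [PySem.Set.add] using hm
  · rw [PySem.Dict.setdefault_of_not_contains _ _ (by simpa using hc), pv_keys_insert,
      pv_keys_insert]

theorem pv_fold_getD (es : List (String × String × Int)) (d : PySem.Dict String Int)
    (k : String) :
    (es.foldl pvStep d).getD k 0 = d.getD k 0 + ((es.map (·.1)).count k : Int) := by
  induction es generalizing d with
  | nil => simp
  | cons e es ih =>
    rw [List.foldl_cons, ih, pv_getD_step]
    by_cases h : k = e.1 <;> simp [h, eq_comm] <;> omega

theorem pv_fold_keys (es : List (String × String × Int)) (d : PySem.Dict String Int) :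
    (es.foldl pvStep d).keys =
      PySem.Set.update d.keys (es.flatMap (fun e => [e.1, e.2.1])) := by
  induction es generalizing d with
  | nil => simp [PySem.Set.update]
  | cons e es ih =>
    rw [List.foldl_cons, ih, pv_keys_step]
    simp [PySem.Set.update]

theorem pv_fold_nodup (es : List (String × String × Int)) :
    (es.foldl pvStep PySem.Dict.empty).keys.Nodup := by
  rw [pv_fold_keys]
  simpa [PySem.Set.update, PySem.Set.ofList_eq_foldl] using
    PySem.Set.nodup_ofList (es.flatMap (fun e => [e.1, e.2.1]))

theorem pv_filter_add (p : String → Bool) (s : PySem.Set String) (x : String) :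
    (PySem.Set.add s x).filter p =
      if p x then PySem.Set.add (s.filter p) x else s.filter p := by
  simp only [PySem.Set.add, PySem.Set.contains]
  by_cases hm : x ∈ s
  · have hf : x ∈ List.filter p s ↔ p x := by
      constructor
      · intro h; exact (List.mem_filter.mp h).2
      · intro h; exact List.mem_filter.mpr ⟨hm, h⟩
    by_cases hx : p x <;> simp [hm, hx, hf]
  · have hf : ¬ x ∈ List.filter p s := fun h => hm (List.mem_filter.mp h).1
    by_cases hx : p x <;> simp [hm, hx, hf]

theorem pv_filter_ofList (p : String → Bool) (xs : List String) :
    (PySem.Set.ofList xs).filter p = PySem.Set.ofList (xs.filter p) := by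
  induction xs using List.reverseRecOn with
  | nil => rfl
  | append_singleton xs x ih =>
    rw [PySem.Set.ofList_append_singleton, pv_filter_add, List.filter_append]
    by_cases hx : p x
    · simp [hx, ih, PySem.Set.ofList_append_singleton]
    · simp [hx, ih]

-- binary search returns the boundary k of any position-monotone predicate it brackets
theorem pv_boundary_eq (L : List String) (n : String) (u : Bool) (k : Nat)
    (_hk : k ≤ L.length)
    (hlow : ∀ i, (h : i < L.length) → i < k → (L[i] < n || (u && (L[i] == n))) = true)
    (hhigh : ∀ i, (h : i < L.length) → k ≤ i → (L[i] < n || (u && (L[i] == n))) = false) :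
    ∀ lo hi, lo ≤ k → k ≤ hi → hi ≤ L.length → pvBoundary L n u lo hi = k := by
  intro lo hi
  induction hlo : hi - lo using Nat.strong_induction_on generalizing lo hi with
  | _ d ih =>
    intro h1 h2 h3
    rw [pvBoundary]
    by_cases h : lo < hi
    · simp only [h, dif_pos]
      have hmid : (lo + hi) / 2 < L.length := by omega
      have hg : L.getD ((lo + hi) / 2) "" = L[(lo + hi) / 2] := List.getD_eq_getElem L "" hmid
      by_cases hc : (L[(lo+hi)/2] < n || (u && (L[(lo+hi)/2] == n))) = true
      · have hlt : (lo + hi) / 2 < k := by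
          by_contra hge
          rw [hhigh _ hmid (by omega)] at hc
          exact absurd hc (by simp)
        rw [hg]
        simp only [hc, if_pos]
        exact ih (hi - ((lo+hi)/2 + 1)) (by omega) _ _ rfl (by omega) h2 h3
      · have hge : k ≤ (lo + hi) / 2 := by
          by_contra hlt
          exact hc (hlow _ hmid (by omega))
        rw [hg]
        simp only [Bool.not_eq_true] at hc
        simp only [hc, if_neg, Bool.false_eq_true, not_false_iff]
        exact ih ((lo+hi)/2 - lo) (by omega) _ _ rfl h1 hge (by omega)
    · simp only [h, dif_neg, not_false_iff]
      omega

-- on a sorted list, a downward-closed predicate holds exactly on the first countP positions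
theorem pv_sorted_prefix (L : List String) (p : String → Bool)
    (hdc : ∀ x y : String, x ≤ y → p y = true → p x = true)
    (hs : L.Pairwise (· ≤ ·)) :
    ∀ i, (h : i < L.length) → (p L[i] = true ↔ i < L.countP p) := by
  induction L with
  | nil => intro i h; simp at h
  | cons a t ih =>
    rcases List.pairwise_cons.mp hs with ⟨ha, ht⟩
    intro i h
    by_cases hpa : p a = true
    · rw [List.countP_cons_of_pos (pa := hpa)]
      cases i with
      | zero => simpa using hpa
      | succ j =>
        have hj : j < t.length := by simpa using h
        simpa using (ih ht j hj)
    · have hall : ∀ x ∈ t, ¬ p x = true := fun x hx hpx => hpa (hdc a x (ha x hx) hpx)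
      have hct : t.countP p = 0 := by
        rw [List.countP_eq_zero]; exact hall
      rw [List.countP_cons_of_neg (pa := by simpa using hpa), hct]
      cases i with
      | zero => simpa using hpa
      | succ j =>
        have hj : j < t.length := by simpa using h
        simp [hall t[j] (List.getElem_mem hj)]

theorem pv_countP_split (L : List String) (n : String) :
    L.countP (fun x => x < n || (x == n)) = L.countP (fun x => x < n) + L.count n := by
  induction L with
  | nil => simp
  | cons a t ih =>
    simp only [List.countP_cons, List.count_cons, ih]
    rcases lt_trichotomy a n with h | h | h
    · have h2 : ¬ a = n := ne_of_lt h
      simp [h, h2]; omega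
    · subst h
      simp; omega
    · have h1 : ¬ a < n := not_lt_of_gt h
      have h2 : ¬ a = n := ne_of_gt h
      simp [h1, h2]

-- on a sorted list, boundary(upper) - boundary(lower) over [0, len) is the multiplicity
theorem pv_boundary_count (L : List String) (n : String) (hs : L.Pairwise (· ≤ ·)) :
    pvBoundary L n true 0 L.length = L.countP (fun x => x < n) + L.count n ∧
    pvBoundary L n false 0 L.length = L.countP (fun x => x < n) := by
  constructor
  · rw [← pv_countP_split]
    refine pv_boundary_eq L n true (L.countP (fun x => x < n || (x == n)))
      (List.countP_le_length) ?_ ?_ 0 L.length (by omega) ?_ le_rfl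
    · intro i h hik
      have := (pv_sorted_prefix L (fun x => x < n || (x == n))
        (fun x y hxy hp => by
          rcases Bool.or_eq_true_iff.mp hp with h' | h'
          · simp [lt_of_le_of_lt hxy (by simpa using h')]
          · have : y = n := by simpa using h'
            subst this
            rcases lt_or_eq_of_le hxy with h'' | h'' <;> simp [h''])
        hs i h).mpr hik
      simpa using this
    · intro i h hk
      have := (pv_sorted_prefix L (fun x => x < n || (x == n))
        (fun x y hxy hp => by
          rcases Bool.or_eq_true_iff.mp hp with h' | h'
          · simp [lt_of_le_of_lt hxy (by simpa using h')]
          · have : y = n := by simpa using h'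
            subst this
            rcases lt_or_eq_of_le hxy with h'' | h'' <;> simp [h''])
        hs i h)
      simp only [Bool.true_and]
      by_contra hc
      exact absurd (this.mp (by revert hc; cases (decide (L[i] < n) || (L[i] == n)) <;> simp)) (by omega)
    · exact List.countP_le_length
  · refine pv_boundary_eq L n false (L.countP (fun x => x < n))
      (List.countP_le_length) ?_ ?_ 0 L.length (by omega) (List.countP_le_length) le_rfl
    · intro i h hik
      have := (pv_sorted_prefix L (fun x => x < n)
        (fun x y hxy hp => by simp [lt_of_le_of_lt hxy (by simpa using hp)]) hs i h).mpr hik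
      simpa only [Bool.false_and, Bool.or_false] using this
    · intro i h hk
      have := pv_sorted_prefix L (fun x => x < n)
        (fun x y hxy hp => by simp [lt_of_le_of_lt hxy (by simpa using hp)]) hs i h
      by_contra hc
      exact absurd (this.mp (by revert hc; cases (decide (L[i] < n)) <;> simp)) (by omega)

-- ===== VERDICT (by name: the statement is the Claim_ definition above) =====
theorem detect_learnable_nodes_spec : Claim_equal_detect_learnable_nodes := by
  intro edges m _
  unfold Spec_detect_learnable_nodes
  simp only [detect_learnable_nodes, detect_learnable_nodes_alt]
  have hfold : (edges.foldl (fun d e =>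
      let d1 := d.insert e.1 (d.getD e.1 0 + 1)
      d1.setdefault e.2.1 (d1.getD e.2.1 0)) PySem.Dict.empty)
      = edges.foldl pvStep PySem.Dict.empty := rfl
  rw [hfold]
  set D := edges.foldl pvStep PySem.Dict.empty with hD
  have hnd : D.keys.Nodup := pv_fold_nodup edges
  have hkeys : D.keys = PySem.Set.ofList (edges.flatMap (fun e => [e.1, e.2.1])) := by
    rw [hD, pv_fold_keys]
    simp [PySem.Set.update, PySem.Set.ofList_eq_foldl, PySem.Dict.keys_empty]
  have hitems : D.items = D.keys.map (fun k => (k, D.getD k 0)) :=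
    PySem.Dict.items_eq_map_keys D hnd 0
  rw [hitems, List.filter_map, List.map_map]
  have h1 : ((fun p : String × Int => decide (m ≤ p.2)) ∘ fun k => (k, D.getD k 0))
      = fun k => decide (m ≤ D.getD k 0) := rfl
  have h2 : ((fun p : String × Int => p.1) ∘ fun k => (k, D.getD k 0)) = id := rfl
  rw [h1, h2, List.map_id, hkeys]
  set P := PySem.List.sorted (edges.map (fun e => e.1)) (fun x => x) false with hP
  have hsorted : P.Pairwise (· ≤ ·) := by
    have := PySem.List.sorted_pairwise (edges.map (fun e => e.1)) (fun x => x)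
    simpa using this
  have hcnt : (fun n => decide (m ≤ D.getD n 0))
      = fun n => decide (m ≤ ((pvBoundary P n true 0 P.length : Int)
          - (pvBoundary P n false 0 P.length : Int))) := by
    funext n
    rcases pv_boundary_count P n hsorted with ⟨hu, hl⟩
    have hperm : P.Perm (edges.map (fun e => e.1)) :=
      PySem.List.sorted_perm (edges.map (fun e => e.1)) (fun x => x) false
    have hgetd := pv_fold_getD edges PySem.Dict.empty n
    rw [← hD] at hgetd
    rw [hgetd, hu, hl, hperm.count_eq, decide_eq_decide]
    have h0 : (PySem.Dict.empty : PySem.Dict String Int).getD n 0 = 0 := rfl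
    rw [h0]
    push_cast
    omega
  rw [hcnt, pv_filter_ofList, PySem.Set.ofList_ofList]
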